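-- pv_equiv track=rewrite | github.com/DE-Verifier/DE-Verifier | parsers/azure_parser.py | _classify_job_log_operation
-- ===== SOURCE A (Python) =====
-- from typing import Dict, Optional, List, Iterable, Tuple
--
-- def _classify_job_log_operation(resources: List[dict]) -> str:
--     category_priority = ["network", "credential", "failure", "command"]
--     categories = {
--         resource.get("name")
--         for resource in resources
--         if resource.get("type") == "log_category"
--     }
--     for category in category_priority:
--         if category in categories:
--             return f"Job.Log.{category.capitalize()}"
--     return "Job.Log.General"
-- ===== SOURCE B (Python) =====
-- def _classify_job_log_operation(resources):
--     priority = {"network": 0, "credential": 1, "failure": 2, "command": 3}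
--     labels = ["Job.Log.Network", "Job.Log.Credential", "Job.Log.Failure",
--               "Job.Log.Command", "Job.Log.General"]
--     best = 4
--     for r in resources:
--         if r.get("type") == "log_category":
--             rank = priority.get(r.get("name"), 4)
--             if rank < best:
--                 best = rank
--     return labels[best]
-- ===== Notes on version B (the rewrite author's own statement) =====
-- stated objective: alternative
-- what changed: B replaces A's build-a-set-then-loop-over-priorities scheme with a single pass over the resources that maintains the minimum priority rank seen (via a rank dict), then indexes a precomputed label table by that rank.
import Mathlib
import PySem

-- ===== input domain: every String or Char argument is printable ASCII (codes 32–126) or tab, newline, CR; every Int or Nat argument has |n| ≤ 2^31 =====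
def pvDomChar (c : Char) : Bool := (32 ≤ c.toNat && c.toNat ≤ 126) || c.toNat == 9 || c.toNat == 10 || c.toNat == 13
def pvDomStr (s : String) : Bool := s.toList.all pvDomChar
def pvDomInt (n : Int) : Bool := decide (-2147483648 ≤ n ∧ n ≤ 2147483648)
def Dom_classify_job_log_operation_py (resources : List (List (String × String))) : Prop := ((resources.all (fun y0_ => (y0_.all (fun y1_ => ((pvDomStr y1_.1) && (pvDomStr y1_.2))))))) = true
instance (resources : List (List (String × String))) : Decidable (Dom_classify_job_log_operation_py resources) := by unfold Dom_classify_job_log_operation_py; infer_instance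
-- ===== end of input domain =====

-- B replaces A's build-a-set-then-loop-over-priorities scheme with a single pass over the
-- resources keeping the minimum priority rank, then a table lookup (alternative decomposition).


-- ===== PORT A =====
-- str.capitalize(), ported by hand (upper first char, lower the rest); exact on the ASCII domain
def pyCapitalize (s : String) : String :=
  match s.toList with
  | [] => ""
  | c :: rest => String.ofList (PySem.Chars.upperChar c :: rest.map PySem.Chars.lowerChar)

-- the 'for category in category_priority: if category in categories: return …' loop of A
def classifyALoop (cats : PySem.Set (Option String)) : List String → String
  | [] => "Job.Log.General"
  | c :: rest =>
      if (some c) ∈ cats then "Job.Log." ++ pyCapitalize c else classifyALoop cats rest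

def classify_job_log_operation_py (resources : List (List (String × String))) : String :=
  let categories : PySem.Set (Option String) :=
    resources.foldl
      (fun s r =>
        if PySem.Dict.get? ⟨r⟩ "type" == some "log_category"
        then PySem.Set.add s (PySem.Dict.get? ⟨r⟩ "name") else s)
      PySem.Set.empty
  classifyALoop categories ["network", "credential", "failure", "command"]

-- ===== PORT B =====
-- priority.get(r.get("name"), 4): the key may be None (never in the dict) — ported by hand:
-- none ↦ the default, some s ↦ dict lookup with default (exact: the dict's keys are strings)
def rankStep (priority : PySem.Dict String Nat) (best : Nat) (r : List (String × String)) : Nat :=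
  if PySem.Dict.get? ⟨r⟩ "type" == some "log_category" then
    let rank :=
      match PySem.Dict.get? ⟨r⟩ "name" with
      | none => 4
      | some s => PySem.Dict.getD priority s 4
    if rank < best then rank else best
  else best

def classify_job_log_operation_py_alt (resources : List (List (String × String))) : String :=
  let priority : PySem.Dict String Nat :=
    ⟨[("network", 0), ("credential", 1), ("failure", 2), ("command", 3)]⟩
  let labels := ["Job.Log.Network", "Job.Log.Credential", "Job.Log.Failure",
                 "Job.Log.Command", "Job.Log.General"]
  let best := resources.foldl (rankStep priority) 4
  labels.getD best ""

-- ===== PRECONDITION & SPEC =====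
def Spec_classify_job_log_operation_py (resources : List (List (String × String))) (out : String) : Prop := out = classify_job_log_operation_py_alt resources
instance (resources : List (List (String × String))) (out : String) : Decidable (Spec_classify_job_log_operation_py resources out) := by unfold Spec_classify_job_log_operation_py; infer_instance

-- ===== CLAIM (what is proved, stated in full; the proofs are below) =====
def Claim_equal_classify_job_log_operation_py : Prop := ∀ (resources : List (List (String × String))), Dom_classify_job_log_operation_py resources → Spec_classify_job_log_operation_py resources (classify_job_log_operation_py resources)

-- ===== LEMMAS AND PROOFS =====

-- 'there is a log_category resource named c' — the common pivot of both proofs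
def anyc (rs : List (List (String × String))) (c : String) : Bool :=
  rs.any (fun r =>
    PySem.Dict.get? ⟨r⟩ "name" == some c
    && PySem.Dict.get? ⟨r⟩ "type" == some "log_category")

-- the minimum rank, written as the nested-if decision both programs make
def minRank (rs : List (List (String × String))) : Nat :=
  if anyc rs "network" then 0
  else if anyc rs "credential" then 1
  else if anyc rs "failure" then 2
  else if anyc rs "command" then 3
  else 4

def pvPriority : PySem.Dict String Nat :=
  ⟨[("network", 0), ("credential", 1), ("failure", 2), ("command", 3)]⟩

theorem minRank_le (rs : List (List (String × String))) : minRank rs ≤ 4 := by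
  unfold minRank; split_ifs <;> omega

-- the contribution of one resource, as a rank
def rankOf (r : List (String × String)) : Nat :=
  if PySem.Dict.get? ⟨r⟩ "type" == some "log_category" then
    match PySem.Dict.get? ⟨r⟩ "name" with
    | none => 4
    | some s => PySem.Dict.getD pvPriority s 4
  else 4

theorem getD_pvPriority_ne (s : String) (h1 : s ≠ "network") (h2 : s ≠ "credential")
    (h3 : s ≠ "failure") (h4 : s ≠ "command") : PySem.Dict.getD pvPriority s 4 = 4 := by
  simp [pvPriority, PySem.Dict.getD, PySem.Dict.get?, Ne.symm h1, Ne.symm h2, Ne.symm h3, Ne.symm h4]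

theorem rankOf_le (r : List (String × String)) : rankOf r ≤ 4 := by
  unfold rankOf
  by_cases hT : (PySem.Dict.get? (⟨r⟩ : PySem.Dict String String) "type" == some "log_category") = true
  · simp only [hT, if_true]
    cases hN : PySem.Dict.get? (⟨r⟩ : PySem.Dict String String) "name" with
    | none => simp
    | some s =>
      simp only []
      by_cases h1 : s = "network"; · subst h1; rw [show PySem.Dict.getD pvPriority "network" 4 = 0 from rfl]; omega
      by_cases h2 : s = "credential"; · subst h2; rw [show PySem.Dict.getD pvPriority "credential" 4 = 1 from rfl]; omega
      by_cases h3 : s = "failure"; · subst h3; rw [show PySem.Dict.getD pvPriority "failure" 4 = 2 from rfl]; omega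
      by_cases h4 : s = "command"; · subst h4; rw [show PySem.Dict.getD pvPriority "command" 4 = 3 from rfl]; omega
      rw [getD_pvPriority_ne s h1 h2 h3 h4]
  · have hT' : (PySem.Dict.get? (⟨r⟩ : PySem.Dict String String) "type" == some "log_category") = false := by
      simpa using hT
    simp [hT']

theorem rankStep_eq_min (best : Nat) (r : List (String × String)) (hb : best ≤ 4) :
    rankStep pvPriority best r = min best (rankOf r) := by
  have := rankOf_le r
  unfold rankStep rankOf at *
  by_cases hT : (PySem.Dict.get? (⟨r⟩ : PySem.Dict String String) "type" == some "log_category") = true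
  · simp only [hT, if_true] at *
    cases hN : PySem.Dict.get? (⟨r⟩ : PySem.Dict String String) "name" with
    | none => dsimp only; split_ifs <;> omega
    | some s =>
      rw [hN] at this
      dsimp only at this ⊢
      split_ifs <;> omega
  · have hT' : (PySem.Dict.get? (⟨r⟩ : PySem.Dict String String) "type" == some "log_category") = false := by
      simpa using hT
    simp only [hT', Bool.false_eq_true, if_false]
    omega

theorem minRank_cons (r : List (String × String)) (rs : List (List (String × String))) :
    minRank (r :: rs) = min (rankOf r) (minRank rs) := by
  unfold minRank rankOf
  simp only [anyc, List.any_cons]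
  by_cases hT : (PySem.Dict.get? (⟨r⟩ : PySem.Dict String String) "type" == some "log_category") = true
  · simp only [hT, Bool.and_true, if_true]
    cases hN : PySem.Dict.get? (⟨r⟩ : PySem.Dict String String) "name" with
    | none =>
      have t0 : ∀ c : String, ((none : Option String) == some c) = false := fun _ => rfl
      dsimp only
      simp only [t0, Bool.false_or]
      split_ifs <;> omega
    | some s =>
      dsimp only
      by_cases h1 : s = "network"
      · subst h1
        rw [show PySem.Dict.getD pvPriority "network" 4 = 0 from rfl]
        simp only [show ((some "network" : Option String) == some "network") = true from by decide,
          Bool.true_or, if_true]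
        split_ifs <;> omega
      · by_cases h2 : s = "credential"
        · subst h2
          rw [show PySem.Dict.getD pvPriority "credential" 4 = 1 from rfl]
          simp only [show ((some "credential" : Option String) == some "network") = false from by decide,
            show ((some "credential" : Option String) == some "credential") = true from by decide,
            Bool.true_or, Bool.false_or, if_true]
          split_ifs <;> omega
        · by_cases h3 : s = "failure"
          · subst h3
            rw [show PySem.Dict.getD pvPriority "failure" 4 = 2 from rfl]
            simp only [show ((some "failure" : Option String) == some "network") = false from by decide,
              show ((some "failure" : Option String) == some "credential") = false from by decide,
              show ((some "failure" : Option String) == some "failure") = true from by decide,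
              Bool.true_or, Bool.false_or, if_true]
            split_ifs <;> omega
          · by_cases h4 : s = "command"
            · subst h4
              rw [show PySem.Dict.getD pvPriority "command" 4 = 3 from rfl]
              simp only [show ((some "command" : Option String) == some "network") = false from by decide,
                show ((some "command" : Option String) == some "credential") = false from by decide,
                show ((some "command" : Option String) == some "failure") = false from by decide,
                show ((some "command" : Option String) == some "command") = true from by decide,
                Bool.true_or, Bool.false_or, if_true]
              split_ifs <;> omega
            · rw [getD_pvPriority_ne s h1 h2 h3 h4]
              have e1 : (some s == some "network") = false := by simp [h1]
              have e2 : (some s == some "credential") = false := by simp [h2]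
              have e3 : (some s == some "failure") = false := by simp [h3]
              have e4 : (some s == some "command") = false := by simp [h4]
              simp only [e1, e2, e3, e4, Bool.false_or]
              split_ifs <;> omega
  · have hT' : (PySem.Dict.get? (⟨r⟩ : PySem.Dict String String) "type" == some "log_category") = false := by
      simpa using hT
    simp only [hT', Bool.and_false, Bool.false_or, Bool.false_eq_true, if_false]
    split_ifs <;> omega

theorem foldl_rankStep (rs : List (List (String × String))) (b : Nat) (hb : b ≤ 4) :
    rs.foldl (rankStep pvPriority) b = min b (minRank rs) := by
  induction rs generalizing b with
  | nil => simp [minRank, anyc]; omega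
  | cons r rs ih =>
    have h1 := rankOf_le r
    rw [List.foldl_cons, rankStep_eq_min b r hb, ih _ (by omega), minRank_cons]
    omega

-- A's set membership, characterised by a direct scan
theorem mem_buildSet (rs : List (List (String × String))) (s : PySem.Set (Option String))
    (x : Option String) :
    x ∈ rs.foldl
      (fun s r =>
        if PySem.Dict.get? ⟨r⟩ "type" == some "log_category"
        then PySem.Set.add s (PySem.Dict.get? ⟨r⟩ "name") else s) s
    ↔ x ∈ s ∨ ∃ r ∈ rs, PySem.Dict.get? ⟨r⟩ "name" = x ∧
        PySem.Dict.get? ⟨r⟩ "type" = some "log_category" := by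
  induction rs generalizing s with
  | nil => simp
  | cons r rs ih =>
    simp only [List.foldl_cons, ih]
    by_cases h : PySem.Dict.get? ⟨r⟩ "type" = some "log_category"
    · simp only [h, beq_self_eq_true, if_true, PySem.Set.mem_add]
      constructor
      · rintro ((hs | rfl) | ⟨r', hr', h1, h2⟩)
        · exact Or.inl hs
        · exact Or.inr ⟨r, List.mem_cons_self .., rfl, h⟩
        · exact Or.inr ⟨r', List.mem_cons_of_mem r hr', h1, h2⟩
      · rintro (hs | ⟨r', hr', h1, h2⟩)
        · exact Or.inl (Or.inl hs)
        · rcases List.mem_cons.mp hr' with rfl | hr'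
          · exact Or.inl (Or.inr h1.symm)
          · exact Or.inr ⟨r', hr', h1, h2⟩
    · have hb : (PySem.Dict.get? (⟨r⟩ : PySem.Dict String String) "type"
          == some "log_category") = false := by simp [h]
      simp only [hb, Bool.false_eq_true, if_false]
      constructor
      · rintro (hs | ⟨r', hr', h1, h2⟩)
        · exact Or.inl hs
        · exact Or.inr ⟨r', List.mem_cons_of_mem r hr', h1, h2⟩
      · rintro (hs | ⟨r', hr', h1, h2⟩)
        · exact Or.inl hs
        · rcases List.mem_cons.mp hr' with rfl | hr'
          · exact absurd h2 h
          · exact Or.inr ⟨r', hr', h1, h2⟩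

theorem mem_buildSet_iff_anyc (rs : List (List (String × String))) (c : String) :
    ((some c) ∈ rs.foldl
      (fun s r =>
        if PySem.Dict.get? ⟨r⟩ "type" == some "log_category"
        then PySem.Set.add s (PySem.Dict.get? ⟨r⟩ "name") else s) PySem.Set.empty)
    ↔ anyc rs c = true := by
  rw [mem_buildSet]
  unfold anyc
  rw [List.any_eq_true]
  simp only [PySem.Set.empty, List.not_mem_nil, false_or, Bool.and_eq_true, beq_iff_eq]

-- A equals the label table indexed by minRank
theorem A_eq_table (rs : List (List (String × String))) :
    classify_job_log_operation_py rs =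
    (["Job.Log.Network", "Job.Log.Credential", "Job.Log.Failure",
      "Job.Log.Command", "Job.Log.General"]).getD (minRank rs) "" := by
  unfold classify_job_log_operation_py minRank
  simp only [classifyALoop, mem_buildSet_iff_anyc]
  by_cases h1 : anyc rs "network" = true <;> by_cases h2 : anyc rs "credential" = true <;>
    by_cases h3 : anyc rs "failure" = true <;> by_cases h4 : anyc rs "command" = true <;>
    simp only [h1, h2, h3, h4, if_true] <;> rfl

-- ===== VERDICT (by name: the statement is the Claim_ definition above) =====
theorem classify_job_log_operation_py_spec : Claim_equal_classify_job_log_operation_py := by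
  intro rs _
  unfold Spec_classify_job_log_operation_py classify_job_log_operation_py_alt
  show classify_job_log_operation_py rs = _
  rw [A_eq_table]
  show _ = List.getD _ (rs.foldl (rankStep pvPriority) 4) _
  rw [foldl_rankStep rs 4 (le_refl 4)]
  have := minRank_le rs
  congr 1
  omega
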